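-- pv_equiv track=rewrite | github.com/mugetsu0422/AI-Project2 | Task_e.py | heuristic_value
-- ===== SOURCE A (Python) =====
-- SIZE = 8
--
-- def initial_state(board, queens):
--     if len(queens) > 0:
--         for item in queens:
--             x = item[0]
--             y = item[1]
--             board[x][y] = True
--
--     return board
--
-- def is_possible(row, col, board):
--     # Check in the same row and colunm
--     for item in range(SIZE):
--         if board[item][col]  and item != row :
--             return False
--
--         if board[row][item]  and item != col :
--             return False
--
--     # Check 2 diagonals
--     for item in range(-SIZE, SIZE + 1):
--         if item == 0:
--             continue
--
--         x = row + item
--         y = col + item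
--
--         if x >= 0 and x < SIZE and y >=0 and y < SIZE:
--             if board[x][y] :
--                 return False
--
--         x = row - item
--         y = col + item
--
--         if x >= 0 and x < SIZE and y >= 0 and y < SIZE:
--             if board[x][y] :
--                 return False
--
--     return True
--
-- def heuristic_value(queens):
--     h = 0
--     board = [[ False for i in range(SIZE) ] for j in range(SIZE)]
--     initial_state(board,queens)
--
--     for i in range(SIZE):
--         for j in range(SIZE):
--             if is_possible(i,j,board) and not board[i][j] :
--                 h += 1
--     return h
-- ===== SOURCE B (Python) =====
-- SIZE = 8
--
-- def initial_state(board, queens):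
--     if len(queens) > 0:
--         for item in queens:
--             x = item[0]
--             y = item[1]
--             board[x][y] = True
--
--     return board
--
-- def heuristic_value(queens):
--     board = [[False for i in range(SIZE)] for j in range(SIZE)]
--     initial_state(board, queens)
--
--     # attack tables indexed by row, col, i-j+7 (diagonal) and i+j (anti-diagonal)
--     row_att = [any(board[i][j] for j in range(SIZE)) for i in range(SIZE)]
--     col_att = [any(board[i][j] for i in range(SIZE)) for j in range(SIZE)]
--     diag_att = [any(board[i][j] for i in range(SIZE) for j in range(SIZE) if i - j + 7 == d)
--                 for d in range(2 * SIZE - 1)]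
--     anti_att = [any(board[i][j] for i in range(SIZE) for j in range(SIZE) if i + j == d)
--                 for d in range(2 * SIZE - 1)]
--
--     h = 0
--     for i in range(SIZE):
--         for j in range(SIZE):
--             if not (board[i][j] or row_att[i] or col_att[j]
--                     or diag_att[i - j + 7] or anti_att[i + j]):
--                 h += 1
--     return h
-- ===== Notes on version B (the rewrite author's own statement) =====
-- stated objective: alternative
-- what changed: Instead of re-scanning rows, columns and both diagonals of the whole board for every square (is_possible), B builds attack lookup tables (row, column, i-j diagonal, i+j anti-diagonal) in one pass over the board and then counts safe empty squares with O(1) table lookups per square.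
import Mathlib
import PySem

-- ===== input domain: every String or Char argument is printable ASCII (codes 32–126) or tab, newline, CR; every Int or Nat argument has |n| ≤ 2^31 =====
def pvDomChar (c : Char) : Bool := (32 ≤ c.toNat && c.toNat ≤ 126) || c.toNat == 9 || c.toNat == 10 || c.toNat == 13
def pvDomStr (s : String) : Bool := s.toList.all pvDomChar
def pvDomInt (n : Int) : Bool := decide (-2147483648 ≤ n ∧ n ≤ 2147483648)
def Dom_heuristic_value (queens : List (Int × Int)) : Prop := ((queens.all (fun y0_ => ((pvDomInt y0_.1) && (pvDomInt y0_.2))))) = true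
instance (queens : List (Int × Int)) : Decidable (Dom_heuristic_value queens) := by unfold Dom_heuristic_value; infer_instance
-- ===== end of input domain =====

-- B replaces A's per-square full-board scan (is_possible) by attack lookup tables built
-- once from the board; same return value on every input where A returns.

-- ===== PORT A =====
-- board[x][y], total accessor (all reads in both ports use in-range non-negative indices)
def pvCell (b : List (List Bool)) (x y : Int) : Bool :=
  PySem.List.pyGetD (PySem.List.pyGetD b x []) y false

-- board[x][y] = True  (read row, set entry, write row back; Python's negative wrap via pySetD/pyGetD)
def pvSetCell (b : List (List Bool)) (x y : Int) : List (List Bool) :=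
  PySem.List.pySetD b x (PySem.List.pySetD (PySem.List.pyGetD b x []) y true)

def initial_state (board : List (List Bool)) (queens : List (Int × Int)) : List (List Bool) :=
  if queens.length > 0 then
    queens.foldl (fun b item => pvSetCell b item.1 item.2) board
  else board

def is_possible (row col : Int) (board : List (List Bool)) : Bool :=
  -- same row and column
  ((PySem.List.pyRange 0 8 1).all fun item =>
      !(pvCell board item col && item != row) && !(pvCell board row item && item != col)) &&
  -- the two diagonals
  ((PySem.List.pyRange (-8) 9 1).all fun item =>
      if item = 0 then true
      else
        !(decide (0 ≤ row + item ∧ row + item < 8 ∧ 0 ≤ col + item ∧ col + item < 8) &&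
            pvCell board (row + item) (col + item)) &&
        !(decide (0 ≤ row - item ∧ row - item < 8 ∧ 0 ≤ col + item ∧ col + item < 8) &&
            pvCell board (row - item) (col + item)))

def heuristic_value (queens : List (Int × Int)) : Int :=
  let board := initial_state (List.replicate 8 (List.replicate 8 false)) queens
  (PySem.List.pyRange 0 8 1).foldl (fun h i =>
    (PySem.List.pyRange 0 8 1).foldl (fun h j =>
      if is_possible i j board && !pvCell board i j then h + 1 else h) h) 0

-- ===== PORT B =====
def heuristic_value_alt (queens : List (Int × Int)) : Int :=
  let board := initial_state (List.replicate 8 (List.replicate 8 false)) queens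
  let rowAtt := (PySem.List.pyRange 0 8 1).map (fun i =>
      (PySem.List.pyRange 0 8 1).any fun j => pvCell board i j)
  let colAtt := (PySem.List.pyRange 0 8 1).map (fun j =>
      (PySem.List.pyRange 0 8 1).any fun i => pvCell board i j)
  let diagAtt := (PySem.List.pyRange 0 15 1).map (fun d =>
      (PySem.List.pyRange 0 8 1).any fun i =>
        (PySem.List.pyRange 0 8 1).any fun j => decide (i - j + 7 = d) && pvCell board i j)
  let antiAtt := (PySem.List.pyRange 0 15 1).map (fun d =>
      (PySem.List.pyRange 0 8 1).any fun i =>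
        (PySem.List.pyRange 0 8 1).any fun j => decide (i + j = d) && pvCell board i j)
  (PySem.List.pyRange 0 8 1).foldl (fun h i =>
    (PySem.List.pyRange 0 8 1).foldl (fun h j =>
      if !(pvCell board i j || PySem.List.pyGetD rowAtt i false ||
            PySem.List.pyGetD colAtt j false ||
            PySem.List.pyGetD diagAtt (i - j + 7) false ||
            PySem.List.pyGetD antiAtt (i + j) false) then h + 1 else h) h) 0

-- ===== PRECONDITION & SPEC =====
-- Pre_ excludes exactly the queen placements on which Python A raises IndexError
-- (a coordinate outside [-8, 7] indexes past the 8x8 board).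
def Pre_heuristic_value (queens : List (Int × Int)) : Prop :=
  ∀ p ∈ queens, -8 ≤ p.1 ∧ p.1 < 8 ∧ -8 ≤ p.2 ∧ p.2 < 8
instance (queens : List (Int × Int)) : Decidable (Pre_heuristic_value queens) := by
  unfold Pre_heuristic_value; infer_instance
def pvWitness_heuristic_value : (List (Int × Int)) := [(0, 0), (-1, 5)]

def Spec_heuristic_value (queens : List (Int × Int)) (out : Int) : Prop := out = heuristic_value_alt queens
instance (queens : List (Int × Int)) (out : Int) : Decidable (Spec_heuristic_value queens out) := by unfold Spec_heuristic_value; infer_instance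

-- ===== CLAIM (what is proved, stated in full; the proofs are below) =====
def Claim_equal_heuristic_value : Prop := ∀ (queens : List (Int × Int)), Dom_heuristic_value queens → Pre_heuristic_value queens → Spec_heuristic_value queens (heuristic_value queens)

-- ===== LEMMAS AND PROOFS =====

theorem possible_iff (b : List (List Bool)) (i j : Int) (hi : 0 ≤ i ∧ i < 8) (_hj : 0 ≤ j ∧ j < 8)
    (hc : pvCell b i j = false) :
    (((PySem.List.pyRange 0 8 1).all fun item =>
      !(pvCell b item j && item != i) && !(pvCell b i item && item != j)) &&
  ((PySem.List.pyRange (-8) 9 1).all fun item =>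
      if item = 0 then true
      else
        !(decide (0 ≤ i + item ∧ i + item < 8 ∧ 0 ≤ j + item ∧ j + item < 8) &&
            pvCell b (i + item) (j + item)) &&
        !(decide (0 ≤ i - item ∧ i - item < 8 ∧ 0 ≤ j + item ∧ j + item < 8) &&
            pvCell b (i - item) (j + item)))) =
    (!(((PySem.List.pyRange 0 8 1).any fun t => pvCell b i t) ||
       ((PySem.List.pyRange 0 8 1).any fun t => pvCell b t j) ||
       ((PySem.List.pyRange 0 8 1).any fun x =>
          (PySem.List.pyRange 0 8 1).any fun y => decide (x - y + 7 = i - j + 7) && pvCell b x y) ||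
       ((PySem.List.pyRange 0 8 1).any fun x =>
          (PySem.List.pyRange 0 8 1).any fun y => decide (x + y = i + j) && pvCell b x y))) := by
  rw [Bool.eq_iff_iff]
  simp only [Bool.and_eq_true, List.all_eq_true, PySem.List.mem_pyRange_one,
    Bool.not_eq_true', Bool.and_eq_false_iff, Bool.not_eq_true, Bool.or_eq_false_iff,
    List.any_eq_false, bne_eq_false_iff_eq]
  constructor
  · rintro ⟨h1, h2⟩
    refine ⟨⟨⟨?_, ?_⟩, ?_⟩, ?_⟩
    · intro x hx
      rcases (h1 x hx).2 with h | h
      · exact h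
      · rw [h]; exact hc
    · intro x hx
      rcases (h1 x hx).1 with h | h
      · exact h
      · rw [h]; exact hc
    · intro x hx y hy hd
      rcases hd with ⟨hdec, hcell⟩
      have hdd : x - y + 7 = i - j + 7 := of_decide_eq_true hdec
      by_cases ht : y = j
      · have hxi : x = i := by omega
        rw [hxi, ht, hc] at hcell
        exact Bool.false_ne_true hcell
      · have h := h2 (y - j) ⟨by omega, by omega⟩
        rw [if_neg (by omega)] at h
        simp only [Bool.and_eq_true, Bool.not_eq_true', Bool.and_eq_false_iff,
          decide_eq_false_iff_not] at h
        have hx' : i + (y - j) = x := by omega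
        have hy' : j + (y - j) = y := by omega
        rw [hx', hy'] at h
        rcases h.1 with h' | h'
        · exact h' ⟨hx.1, hx.2, hy.1, hy.2⟩
        · rw [h'] at hcell; exact Bool.false_ne_true hcell
    · intro x hx y hy hd
      rcases hd with ⟨hdec, hcell⟩
      have hdd : x + y = i + j := of_decide_eq_true hdec
      by_cases ht : y = j
      · have hxi : x = i := by omega
        rw [hxi, ht, hc] at hcell
        exact Bool.false_ne_true hcell
      · have h := h2 (y - j) ⟨by omega, by omega⟩
        rw [if_neg (by omega)] at h
        simp only [Bool.and_eq_true, Bool.not_eq_true', Bool.and_eq_false_iff,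
          decide_eq_false_iff_not] at h
        have hx' : i - (y - j) = x := by omega
        have hy' : j + (y - j) = y := by omega
        rw [hx', hy'] at h
        rcases h.2 with h' | h'
        · exact h' ⟨hx.1, hx.2, hy.1, hy.2⟩
        · rw [h'] at hcell; exact Bool.false_ne_true hcell
  · rintro ⟨⟨⟨hrow, hcol⟩, hdiag⟩, hanti⟩
    constructor
    · intro x hx
      exact ⟨Or.inl (hcol x hx), Or.inl (hrow x hx)⟩
    · intro x hx
      by_cases hx0 : x = 0
      · rw [if_pos hx0]
      · rw [if_neg hx0, Bool.and_eq_true]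
        constructor
        · by_cases hP : (0 ≤ i + x ∧ i + x < 8 ∧ 0 ≤ j + x ∧ j + x < 8)
          · have hcell : pvCell b (i + x) (j + x) = false := by
              by_contra hcc
              rw [Bool.not_eq_false] at hcc
              exact hdiag (i + x) ⟨by omega, by omega⟩ (j + x) ⟨by omega, by omega⟩
                ⟨decide_eq_true (by omega), hcc⟩
            simp [hcell]
          · simp only [Bool.not_eq_true', Bool.and_eq_false_iff, decide_eq_false_iff_not]
            exact Or.inl hP
        · by_cases hP : (0 ≤ i - x ∧ i - x < 8 ∧ 0 ≤ j + x ∧ j + x < 8)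
          · have hcell : pvCell b (i - x) (j + x) = false := by
              by_contra hcc
              rw [Bool.not_eq_false] at hcc
              exact hanti (i - x) ⟨by omega, by omega⟩ (j + x) ⟨by omega, by omega⟩
                ⟨decide_eq_true (by omega), hcc⟩
            simp [hcell]
          · simp only [Bool.not_eq_true', Bool.and_eq_false_iff, decide_eq_false_iff_not]
            exact Or.inl hP

theorem count_eq (b : List (List Bool)) :
    (PySem.List.pyRange 0 8 1).foldl (fun h i =>
      (PySem.List.pyRange 0 8 1).foldl (fun h j =>
        if is_possible i j b && !pvCell b i j then h + 1 else h) h) (0 : Int) =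
    (PySem.List.pyRange 0 8 1).foldl (fun h i =>
      (PySem.List.pyRange 0 8 1).foldl (fun h j =>
        if !(pvCell b i j ||
              PySem.List.pyGetD ((PySem.List.pyRange 0 8 1).map (fun i =>
                (PySem.List.pyRange 0 8 1).any fun j => pvCell b i j)) i false ||
              PySem.List.pyGetD ((PySem.List.pyRange 0 8 1).map (fun j =>
                (PySem.List.pyRange 0 8 1).any fun i => pvCell b i j)) j false ||
              PySem.List.pyGetD ((PySem.List.pyRange 0 15 1).map (fun d =>
                (PySem.List.pyRange 0 8 1).any fun i =>
                  (PySem.List.pyRange 0 8 1).any fun j =>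
                    decide (i - j + 7 = d) && pvCell b i j)) (i - j + 7) false ||
              PySem.List.pyGetD ((PySem.List.pyRange 0 15 1).map (fun d =>
                (PySem.List.pyRange 0 8 1).any fun i =>
                  (PySem.List.pyRange 0 8 1).any fun j =>
                    decide (i + j = d) && pvCell b i j)) (i + j) false)
        then h + 1 else h) h) (0 : Int) := by
  refine PySem.List.foldl_congr_mem _ _ _ _ ?_
  intro acc i hi
  refine PySem.List.foldl_congr_mem _ _ _ _ ?_
  intro acc2 j hj
  rw [PySem.List.mem_pyRange_one] at hi hj
  rw [PySem.List.pyGetD_map_pyRange_of_nonneg _ 8 i _ hi.1 hi.2,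
      PySem.List.pyGetD_map_pyRange_of_nonneg _ 8 j _ hj.1 hj.2,
      PySem.List.pyGetD_map_pyRange_of_nonneg _ 15 (i - j + 7) _ (by omega) (by omega),
      PySem.List.pyGetD_map_pyRange_of_nonneg _ 15 (i + j) _ (by omega) (by omega)]
  by_cases hcc : pvCell b i j = false
  · simp only [is_possible]
    simp only [possible_iff b i j ⟨hi.1, hi.2⟩ ⟨hj.1, hj.2⟩ hcc]
    simp [hcc]
  · rw [Bool.not_eq_false] at hcc
    simp [hcc]



-- ===== VERDICT (by name: the statement is the Claim_ definition above) =====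
theorem heuristic_value_spec : Claim_equal_heuristic_value := by
  intro queens _ _
  unfold Spec_heuristic_value heuristic_value heuristic_value_alt
  exact count_eq _
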